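-- pv_equiv track=rewrite | github.com/rdhyee/rdhyee_utils | rdhyee_utils/pandoc/utils.py | _parse_by_str
-- ===== SOURCE A (Python) =====
-- def _parse_by_str(by_str):
--     fmt = ""
--     enabled = set()
--     disabled = set()
--
--     # Extract the format specifier (everything before the first '+' or '-')
--     fmt, sep, remainder = (
--         by_str.partition("+") if "+" in by_str else by_str.partition("-")
--     )
--
--     # Initialize variables to hold the current mode ('+' or '-') and extension name
--     mode = None
--     ext = ""
--
--     # Parse the remaining string to identify enabled and disabled extensions
--     for k in sep + remainder:  # Include the separator
--         if k in ["+", "-"]: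
--             if mode:
--                 # Add the current extension to the appropriate set
--                 (enabled if mode == "+" else disabled).add(ext)
--             mode = k
--             ext = ""
--         else:
--             ext += k
--
--     # Handle the last extension
--     if mode:
--         (enabled if mode == "+" else disabled).add(ext)
--
--     return fmt, enabled, disabled
-- ===== SOURCE B (Python) =====
-- def _parse_by_str(by_str):
--     # boundary: first '+' if any, else first '-', else end of string
--     if "+" in by_str:
--         cut = by_str.index("+")
--     elif "-" in by_str:
--         cut = by_str.index("-")
--     else:
--         cut = len(by_str)
--     fmt = by_str[:cut]
--     rest = by_str[cut:]
--     enabled = set()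
--     disabled = set()
--     # consume one whole "<sign><name>" token per step
--     while rest:
--         sign = rest[0]
--         j = 1
--         while j < len(rest) and rest[j] not in "+-":
--             j += 1
--         (enabled if sign == "+" else disabled).add(rest[1:j])
--         rest = rest[j:]
--     return fmt, enabled, disabled
-- ===== Notes on version B (the rewrite author's own statement) =====
-- stated objective: alternative
-- what changed: B replaces A's character-by-character state machine (mode flag, growing ext accumulator, deferred flush) by computing the format boundary via a plus-priority index lookup and then consuming the rest one whole sign-and-name token per step.
import Mathlib
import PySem

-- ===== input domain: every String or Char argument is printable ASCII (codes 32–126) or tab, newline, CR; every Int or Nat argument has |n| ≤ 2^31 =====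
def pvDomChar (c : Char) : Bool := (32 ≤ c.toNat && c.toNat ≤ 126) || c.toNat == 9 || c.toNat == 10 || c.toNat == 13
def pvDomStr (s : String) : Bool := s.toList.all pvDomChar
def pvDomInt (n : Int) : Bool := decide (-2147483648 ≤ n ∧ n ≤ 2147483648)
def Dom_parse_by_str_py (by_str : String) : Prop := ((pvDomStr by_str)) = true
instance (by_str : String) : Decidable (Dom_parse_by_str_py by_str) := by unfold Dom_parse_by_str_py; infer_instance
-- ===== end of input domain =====

-- B replaces A's character state machine (mode flag + ext accumulator + deferred flush) by a
-- '+'-priority boundary index followed by a loop that consumes one whole sign-and-name token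
-- per step; same cost, different decomposition.

-- ===== PORT A =====
-- hand port of str.partition with a one-character separator (exact: splits at the FIRST
-- occurrence; separator absent → (s, "", "")).
def pvPartitionA (cs : List Char) (c : Char) : List Char × List Char × List Char :=
  match cs with
  | [] => ([], [], [])
  | x :: r =>
    if x = c then ([], [c], r)
    else
      let p := pvPartitionA r c
      (x :: p.1, p.2.1, p.2.2)

-- A's "(enabled if mode == '+' else disabled).add(ext)" (appears twice in A)
def pvFlushA (m : Char) (ext : List Char) (en dis : PySem.Set String) :
    PySem.Set String × PySem.Set String :=
  if m = '+' then (PySem.Set.add en (String.ofList ext), dis)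
  else (en, PySem.Set.add dis (String.ofList ext))

-- A's for-loop over sep + remainder, state = (mode, ext, enabled, disabled)
def pvRunA : List Char → Option Char → List Char → PySem.Set String → PySem.Set String →
    PySem.Set String × PySem.Set String
  | [], mode, ext, en, dis =>
    match mode with
    | some m => pvFlushA m ext en dis      -- the final "if mode:" flush
    | none => (en, dis)
  | k :: rest, mode, ext, en, dis =>
    if k = '+' ∨ k = '-' then              -- k in ["+", "-"]
      match mode with
      | some m =>
        let p := pvFlushA m ext en dis
        pvRunA rest (some k) [] p.1 p.2
      | none => pvRunA rest (some k) [] en dis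
    else pvRunA rest mode (ext ++ [k]) en dis

def parse_by_str_py (by_str : String) : String × List String × List String :=
  let cs := by_str.toList
  let p := if cs.contains '+' then pvPartitionA cs '+' else pvPartitionA cs '-'
  let r := pvRunA (p.2.1 ++ p.2.2) none [] PySem.Set.empty PySem.Set.empty
  (String.ofList p.1, r.1, r.2)

-- ===== PORT B =====
def pvNonSep (c : Char) : Bool := !(c == '+' || c == '-')   -- "rest[j] not in '+-'"

-- B's inner "while j < len(rest) and rest[j] not in '+-': j += 1"
def pvScanB (rest : List Char) (j : Nat) : Nat :=
  if h : j < rest.length then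
    if pvNonSep rest[j] then pvScanB rest (j + 1) else j
  else j
termination_by rest.length - j

-- needed by pvRunB's termination
theorem pvScanB_ge (rest : List Char) (j : Nat) : j ≤ pvScanB rest j := by
  induction j using pvScanB.induct (rest := rest) with
  | case1 j h hns ih => rw [pvScanB]; simp only [h, dite_true, hns, if_true]; omega
  | case2 j h hns => rw [pvScanB]; simp [h, hns]
  | case3 j h => rw [pvScanB]; simp [h]

-- B's outer "while rest:" loop
def pvRunB : List Char → PySem.Set String → PySem.Set String →
    PySem.Set String × PySem.Set String
  | [], en, dis => (en, dis)
  | sign :: tl, en, dis =>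
    let j := pvScanB (sign :: tl) 1
    let name := String.ofList (PySem.List.slice (sign :: tl) (some 1) (some (j : Int)))  -- rest[1:j]
    if sign = '+' then pvRunB ((sign :: tl).drop j) (PySem.Set.add en name) dis
    else pvRunB ((sign :: tl).drop j) en (PySem.Set.add dis name)
termination_by rest => rest.length
decreasing_by
  all_goals
    simp only [List.length_drop]
    have := pvScanB_ge (sign :: tl) 1
    simp only [List.length_cons]
    omega

def parse_by_str_py_alt (by_str : String) : String × List String × List String :=
  let cs := by_str.toList
  let cut : Nat :=
    if cs.contains '+' then (PySem.List.index? cs '+').getD 0       -- by_str.index('+'); guarded, so some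
    else if cs.contains '-' then (PySem.List.index? cs '-').getD 0  -- by_str.index('-'); guarded, so some
    else cs.length
  let fmt := PySem.List.slice cs none (some (cut : Int))            -- by_str[:cut]
  let rest := PySem.List.slice cs (some (cut : Int)) none           -- by_str[cut:]
  let r := pvRunB rest PySem.Set.empty PySem.Set.empty
  (String.ofList fmt, r.1, r.2)

-- ===== PRECONDITION & SPEC =====
def Spec_parse_by_str_py (by_str : String) (out : String × List String × List String) : Prop := out = parse_by_str_py_alt by_str
instance (by_str : String) (out : String × List String × List String) : Decidable (Spec_parse_by_str_py by_str out) := by unfold Spec_parse_by_str_py; infer_instance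

-- ===== CLAIM (what is proved, stated in full; the proofs are below) =====
def Claim_equal_parse_by_str_py : Prop := ∀ (by_str : String), Dom_parse_by_str_py by_str → Spec_parse_by_str_py by_str (parse_by_str_py by_str)

-- ===== LEMMAS AND PROOFS =====

theorem pvNonSep_false_iff (c : Char) : pvNonSep c = false ↔ (c = '+' ∨ c = '-') := by
  simp [pvNonSep]; tauto

theorem pvPartitionA_of_mem {cs : List Char} {c : Char} (h : c ∈ cs) :
    pvPartitionA cs c = (cs.takeWhile (· ≠ c), [c], (cs.dropWhile (· ≠ c)).tail) := by
  induction cs with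
  | nil => cases h
  | cons x r ih =>
    by_cases hx : x = c
    · subst hx; simp [pvPartitionA, List.takeWhile, List.dropWhile]
    · have hm : c ∈ r := by cases h with
        | head => exact absurd rfl hx
        | tail _ h' => exact h'
      simp [pvPartitionA, ih hm, List.takeWhile, List.dropWhile, hx]

theorem pvPartitionA_of_not_mem {cs : List Char} {c : Char} (h : c ∉ cs) :
    pvPartitionA cs c = (cs, [], []) := by
  induction cs with
  | nil => rfl
  | cons x r ih =>
    have hx : x ≠ c := fun e => h (e ▸ List.mem_cons_self)
    have hm : c ∉ r := fun e => h (List.mem_cons_of_mem _ e)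
    simp [pvPartitionA, ih hm, hx]

theorem dropWhile_ne_cons {cs : List Char} {c : Char} (h : c ∈ cs) :
    cs.dropWhile (· ≠ c) = c :: (cs.dropWhile (· ≠ c)).tail := by
  induction cs with
  | nil => cases h
  | cons x r ih =>
    by_cases hx : x = c
    · subst hx; simp [List.dropWhile]
    · have hm : c ∈ r := by cases h with
        | head => exact absurd rfl hx
        | tail _ h' => exact h'
      simpa [List.dropWhile_cons, hx] using ih hm

theorem idxOf?_eq_takeWhile_length {cs : List Char} {c : Char} (h : c ∈ cs) :
    List.idxOf? c cs = some (cs.takeWhile (· ≠ c)).length := by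
  induction cs with
  | nil => cases h
  | cons x r ih =>
    by_cases hx : x = c
    · subst hx; simp [List.idxOf?, List.findIdx?_cons, List.takeWhile]
    · have hm : c ∈ r := by cases h with
        | head => exact absurd rfl hx
        | tail _ h' => exact h'
      have := ih hm
      simp only [List.idxOf?] at this ⊢
      simp [List.findIdx?_cons, hx, this]

theorem take_takeWhile_length (cs : List Char) (p : Char → Bool) :
    cs.take (cs.takeWhile p).length = cs.takeWhile p := by
  induction cs with
  | nil => rfl
  | cons x r ih =>
    by_cases hx : p x
    · simp [List.takeWhile, hx, ih]
    · simp [List.takeWhile, hx]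

theorem drop_takeWhile_length (cs : List Char) (p : Char → Bool) :
    cs.drop (cs.takeWhile p).length = cs.dropWhile p := by
  induction cs with
  | nil => rfl
  | cons x r ih =>
    by_cases hx : p x
    · simp [List.takeWhile, List.dropWhile, hx, ih]
    · simp [List.takeWhile, List.dropWhile, hx]

theorem pvScanB_spec (rest : List Char) (j : Nat) :
    pvScanB rest j = j + ((rest.drop j).takeWhile pvNonSep).length := by
  induction j using pvScanB.induct (rest := rest) with
  | case1 j h hns ih =>
    rw [pvScanB]
    simp only [h, dite_true, hns, if_true, ih]
    rw [List.drop_eq_getElem_cons h, List.takeWhile_cons]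
    simp only [hns, if_true, List.length_cons]
    omega
  | case2 j h hns =>
    have hns' : pvNonSep rest[j] = false := by simpa using hns
    rw [pvScanB]
    simp only [h, dite_true, hns', Bool.false_eq_true, if_false]
    rw [List.drop_eq_getElem_cons h, List.takeWhile_cons]
    simp only [hns', Bool.false_eq_true, if_false, List.length_nil]
    omega
  | case3 j h =>
    rw [pvScanB]
    have hnil : rest.drop j = [] := List.drop_eq_nil_of_le (by omega)
    simp [h, hnil]

-- one unfolded step of pvRunB on a separator-led rest, phrased with pvFlushA
theorem pvRunB_cons_sep (k : Char) (tl : List Char) (en dis : PySem.Set String) :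
    pvRunB (k :: tl) en dis =
      (pvRunB (tl.dropWhile pvNonSep)
        (pvFlushA k (tl.takeWhile pvNonSep) en dis).1
        (pvFlushA k (tl.takeWhile pvNonSep) en dis).2) := by
  have hj : pvScanB (k :: tl) 1 = 1 + (tl.takeWhile pvNonSep).length := by
    rw [pvScanB_spec]; simp
  have hname : PySem.List.slice (k :: tl) (some 1) (some ((pvScanB (k :: tl) 1 : Nat) : Int)) =
      tl.takeWhile pvNonSep := by
    rw [hj]
    rw [show ((1 + (tl.takeWhile pvNonSep).length : Nat) : Int) =
        ((1 : Nat) : Int) + (((tl.takeWhile pvNonSep).length : Nat) : Int) by push_cast; ring]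
    rw [show (some (1 : Int)) = some (((1 : Nat) : Int)) from rfl]
    rw [PySem.List.slice_natCast_add]
    simp [take_takeWhile_length]
  have hdrop : (k :: tl).drop (pvScanB (k :: tl) 1) = tl.dropWhile pvNonSep := by
    rw [hj, Nat.add_comm, List.drop_succ_cons, drop_takeWhile_length]
  rw [pvRunB]
  simp only [hname, hdrop, pvFlushA]
  by_cases hk : k = '+' <;> simp [hk]

-- A's state machine in mode = some m with accumulator e equals: flush (m, e ++ next token),
-- then continue B-style on the rest
theorem pvRunA_some (L : List Char) (m : Char) (e : List Char)
    (en dis : PySem.Set String) :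
    pvRunA L (some m) e en dis =
      (pvRunB (L.dropWhile pvNonSep)
        (pvFlushA m (e ++ L.takeWhile pvNonSep) en dis).1
        (pvFlushA m (e ++ L.takeWhile pvNonSep) en dis).2) := by
  induction L generalizing m e en dis with
  | nil => simp [pvRunA, pvRunB]
  | cons k tl ih =>
    by_cases hk : k = '+' ∨ k = '-'
    · have hns : pvNonSep k = false := (pvNonSep_false_iff k).mpr hk
      rw [pvRunA]
      simp only [hk, if_true, ih, List.takeWhile_cons, List.dropWhile_cons, hns,
        Bool.false_eq_true, if_false, List.append_nil, List.nil_append]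
      rw [pvRunB_cons_sep]
    · have hns : pvNonSep k = true := by
        cases hq : pvNonSep k
        · exact absurd ((pvNonSep_false_iff k).mp hq) hk
        · rfl
      rw [pvRunA]
      simp only [hk, if_false, ih, List.takeWhile_cons, List.dropWhile_cons, hns, if_true]
      simp

-- from mode = None on a separator-led rest, A equals B's token loop
theorem pvRunA_eq_pvRunB (k : Char) (tl : List Char) (hk : k = '+' ∨ k = '-')
    (en dis : PySem.Set String) :
    pvRunA (k :: tl) none [] en dis = pvRunB (k :: tl) en dis := by
  rw [pvRunA]
  simp only [hk, if_true]
  rw [pvRunA_some, pvRunB_cons_sep]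
  simp

theorem mem_of_contains {cs : List Char} {c : Char} (h : cs.contains c = true) : c ∈ cs := by
  simpa using h

theorem parse_eq (cs : List Char) :
    (let p := if cs.contains '+' then pvPartitionA cs '+' else pvPartitionA cs '-'
     let r := pvRunA (p.2.1 ++ p.2.2) none [] PySem.Set.empty PySem.Set.empty
     ((String.ofList p.1, r.1, r.2) : String × List String × List String)) =
    (let cut : Nat :=
        if cs.contains '+' then (PySem.List.index? cs '+').getD 0
        else if cs.contains '-' then (PySem.List.index? cs '-').getD 0
        else cs.length
     let fmt := PySem.List.slice cs none (some (cut : Int))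
     let rest := PySem.List.slice cs (some (cut : Int)) none
     let r := pvRunB rest PySem.Set.empty PySem.Set.empty
     (String.ofList fmt, r.1, r.2)) := by
  by_cases hp : cs.contains '+'
  case pos =>
    have hm : '+' ∈ cs := mem_of_contains hp
    have hidx := idxOf?_eq_takeWhile_length hm
    have hcut : ((PySem.List.index? cs '+').getD 0 : Nat) = (cs.takeWhile (· ≠ '+')).length := by
      simp [PySem.List.index?, hidx]
    simp only [hp, if_true, pvPartitionA_of_mem hm, hcut,
      PySem.List.slice_to_natCast, PySem.List.slice_from_natCast]
    have htw : cs.takeWhile (fun x => decide ¬x = '+') = cs.takeWhile (fun x => x ≠ '+') := rfl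
    rw [take_takeWhile_length, drop_takeWhile_length]
    have hrest : ([('+' : Char)] ++ (cs.dropWhile (· ≠ '+')).tail) = cs.dropWhile (· ≠ '+') := by
      rw [List.singleton_append, ← dropWhile_ne_cons hm]
    simp only [hrest]
    rw [dropWhile_ne_cons hm, pvRunA_eq_pvRunB '+' _ (Or.inl rfl)]
  case neg =>
    by_cases hq : cs.contains '-'
    case pos =>
      have hm : '-' ∈ cs := mem_of_contains hq
      have hidx := idxOf?_eq_takeWhile_length hm
      have hcut : ((PySem.List.index? cs '-').getD 0 : Nat) = (cs.takeWhile (· ≠ '-')).length := by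
        simp [PySem.List.index?, hidx]
      simp only [hp, hq, if_true, if_false, Bool.false_eq_true, pvPartitionA_of_mem hm, hcut,
        PySem.List.slice_to_natCast, PySem.List.slice_from_natCast]
      rw [take_takeWhile_length, drop_takeWhile_length]
      have hrest : ([('-' : Char)] ++ (cs.dropWhile (· ≠ '-')).tail) = cs.dropWhile (· ≠ '-') := by
        rw [List.singleton_append, ← dropWhile_ne_cons hm]
      simp only [hrest]
      rw [dropWhile_ne_cons hm, pvRunA_eq_pvRunB '-' _ (Or.inr rfl)]
    case neg =>
      have hm : '-' ∉ cs := fun h => hq (by simpa using h)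
      simp only [hp, hq, if_false, Bool.false_eq_true, pvPartitionA_of_not_mem hm,
        PySem.List.slice_to_natCast, PySem.List.slice_from_natCast]
      simp [pvRunA, pvRunB]

-- ===== VERDICT (by name: the statement is the Claim_ definition above) =====
theorem parse_by_str_py_spec : Claim_equal_parse_by_str_py := by
  intro by_str _
  unfold Spec_parse_by_str_py parse_by_str_py parse_by_str_py_alt
  exact parse_eq by_str.toList
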